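-- pv_equiv track=rewrite | github.com/leoyin1127/on_device_llm_figure_script | chart2radar/eurorad_radar_plots.py | build_model_groups
-- ===== SOURCE A (Python) =====
-- from typing import Dict, Iterable, List, Sequence
--
-- def build_model_groups(model_cols: Sequence[str], matchers: Dict[str, Sequence[str]]) -> Dict[str, List[str]]:
--     """Assign columns to model groups based on substring matchers."""
--
--     groups: Dict[str, List[str]] = {group: [] for group in matchers}
--     for col in model_cols:
--         lowered = col.lower()
--         for group, patterns in matchers.items():
--             if any(pattern in lowered for pattern in patterns):
--                 groups[group].append(col)
--                 break
--     # Drop empty groups to avoid plotting zeroed polygons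
--     return {group: cols for group, cols in groups.items() if cols}
-- ===== SOURCE B (Python) =====
-- from typing import Dict, List, Sequence
--
--
-- def _match(col: str, patterns: Sequence[str]) -> bool:
--     lowered = col.lower()
--     return any(p in lowered for p in patterns)
--
--
-- def build_model_groups(model_cols: Sequence[str], matchers: Dict[str, Sequence[str]]) -> Dict[str, List[str]]:
--     """Group-major assignment: each group takes, in column order, the still-unassigned
--     columns it matches; matched columns leave the pool, empty groups are dropped."""
--     result: Dict[str, List[str]] = {}
--     remaining = list(model_cols)
--     for group, patterns in matchers.items():
--         matched = [c for c in remaining if _match(c, patterns)]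
--         if matched:
--             result[group] = matched
--         remaining = [c for c in remaining if not _match(c, patterns)]
--     return result
-- ===== Notes on version B (the rewrite author's own statement) =====
-- stated objective: alternative
-- what changed: A's column-major loop with an inner break over a mutable per-group dict is replaced by a stateless group-major recursion: each group independently collects, in column order, the columns it matches that no earlier group's patterns match.
import Mathlib
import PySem

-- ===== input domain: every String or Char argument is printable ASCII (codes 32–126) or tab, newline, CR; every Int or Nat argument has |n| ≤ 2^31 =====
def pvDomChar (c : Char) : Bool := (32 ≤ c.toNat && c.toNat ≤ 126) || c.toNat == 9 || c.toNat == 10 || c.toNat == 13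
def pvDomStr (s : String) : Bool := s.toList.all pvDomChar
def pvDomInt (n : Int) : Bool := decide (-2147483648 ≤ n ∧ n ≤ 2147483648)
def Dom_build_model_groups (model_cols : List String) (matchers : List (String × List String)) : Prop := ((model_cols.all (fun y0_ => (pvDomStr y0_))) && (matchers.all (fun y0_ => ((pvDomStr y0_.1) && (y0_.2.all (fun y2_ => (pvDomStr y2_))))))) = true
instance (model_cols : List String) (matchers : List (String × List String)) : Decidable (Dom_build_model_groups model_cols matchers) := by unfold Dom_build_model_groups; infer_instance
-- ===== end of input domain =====

-- B replaces A's column-major loop-with-break over a mutable dict by a stateless group-major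
-- recursion (objective: alternative decomposition, same asymptotic cost).

-- ===== PORT A =====
-- `any(pattern in lowered for pattern in patterns)`
def aMatch (lowered : String) (ps : List String) : Bool :=
  ps.any (fun p => PySem.Str.isIn p lowered)

-- inner `for group, patterns in matchers.items(): … break` (append then break = stop at first match);
-- groups[group] always exists, so `groups[group].append(col)` is modify with an unused default []
def aAssign (col lowered : String) (groups : PySem.Dict String (List String)) :
    List (String × List String) → PySem.Dict String (List String)
  | [] => groups
  | gp :: rest =>
    if aMatch lowered gp.2 then groups.modify gp.1 [] (fun cs => cs ++ [col])
    else aAssign col lowered groups rest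

def build_model_groups (model_cols : List String) (matchers : List (String × List String)) : List (String × List String) :=
  let groups0 : PySem.Dict String (List String) :=
    matchers.foldl (fun d gp => d.insert gp.1 ([] : List String)) PySem.Dict.empty
  let groups := model_cols.foldl (fun d col => aAssign col (PySem.Str.lower col) d matchers) groups0
  groups.items.filter (fun gc => !gc.2.isEmpty)

-- ===== PORT B =====
-- Source B's _match(col, patterns)
def bMatch (col : String) (ps : List String) : Bool :=
  let lowered := PySem.Str.lower col
  ps.any (fun p => PySem.Str.isIn p lowered)

-- Source B's loop over matchers.items(); `result` is a dict whose keys are distinct under Pre_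
-- and are inserted fresh in order, so it is the output list built front to back
def bGo (remaining : List String) :
    List (String × List String) → List (String × List String)
  | [] => []
  | gp :: rest =>
    let matched := remaining.filter (fun c => bMatch c gp.2)
    let tail := bGo (remaining.filter (fun c => !bMatch c gp.2)) rest
    if matched.isEmpty then tail else (gp.1, matched) :: tail

def build_model_groups_alt (model_cols : List String) (matchers : List (String × List String)) : List (String × List String) :=
  bGo model_cols matchers

-- ===== PRECONDITION & SPEC =====
-- Pre_ only excludes association lists with duplicate group keys, which cannot arise from the
-- Python argument `matchers` (a dict); A always returns on every real Python input.
def Pre_build_model_groups (model_cols : List String) (matchers : List (String × List String)) : Prop :=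
  (matchers.map Prod.fst).Nodup
instance (model_cols : List String) (matchers : List (String × List String)) : Decidable (Pre_build_model_groups model_cols matchers) := by unfold Pre_build_model_groups; infer_instance

def pvWitness_build_model_groups : List String × (List (String × List String)) :=
  (["Llama-7B", "GPT-4"], [("llama", ["llama"]), ("gpt", ["gpt"])])

def Spec_build_model_groups (model_cols : List String) (matchers : List (String × List String)) (out : List (String × List String)) : Prop := out = build_model_groups_alt model_cols matchers
instance (model_cols : List String) (matchers : List (String × List String)) (out : List (String × List String)) : Decidable (Spec_build_model_groups model_cols matchers out) := by unfold Spec_build_model_groups; infer_instance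

-- ===== CLAIM (what is proved, stated in full; the proofs are below) =====
def Claim_equal_build_model_groups : Prop := ∀ (model_cols : List String) (matchers : List (String × List String)), Dom_build_model_groups model_cols matchers → Pre_build_model_groups model_cols matchers → Spec_build_model_groups model_cols matchers (build_model_groups model_cols matchers)

-- ===== LEMMAS AND PROOFS =====

-- first entry of ms whose patterns match c has key g
def fkey (ms : List (String × List String)) (g : String) (c : String) : Bool :=
  match ms.find? (fun gp => bMatch c gp.2) with
  | some gp => gp.1 == g
  | none => false

theorem aMatch_lower (c : String) (ps : List String) : aMatch (PySem.Str.lower c) ps = bMatch c ps := rfl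

theorem aAssign_char (c : String) (d : PySem.Dict String (List String)) :
    ∀ ms : List (String × List String),
      aAssign c (PySem.Str.lower c) d ms =
        match ms.find? (fun gp => bMatch c gp.2) with
        | some gp => d.modify gp.1 [] (fun cs => cs ++ [c])
        | none => d := by
  intro ms
  induction ms with
  | nil => rfl
  | cons gp rest ih =>
    by_cases h : bMatch c gp.2
    · simp [aAssign, aMatch_lower, h, List.find?]
    · simp [aAssign, aMatch_lower, h, List.find?, ih]

theorem foldl_getD (ms : List (String × List String)) :
    ∀ (cols : List String) (d : PySem.Dict String (List String)) (g : String),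
      (cols.foldl (fun d col => aAssign col (PySem.Str.lower col) d ms) d).getD g [] =
        d.getD g [] ++ cols.filter (fkey ms g) := by
  intro cols
  induction cols with
  | nil => intro d g; simp
  | cons c cs ih =>
    intro d g
    simp only [List.foldl_cons, List.filter_cons, ih]
    have hstep : (aAssign c (PySem.Str.lower c) d ms).getD g [] =
        d.getD g [] ++ (if fkey ms g c then [c] else []) := by
      rw [aAssign_char]
      unfold fkey
      cases hf : ms.find? (fun gp => bMatch c gp.2) with
      | none => simp
      | some gp =>
        rw [PySem.Dict.getD_modify]
        by_cases hg : g = gp.1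
        · simp [hg]
        · simp [hg, Ne.symm hg, beq_iff_eq]
    rw [hstep]
    by_cases hk : fkey ms g c <;> simp [hk]

theorem foldl_keys (ms : List (String × List String)) :
    ∀ (cols : List String) (d : PySem.Dict String (List String)),
      (∀ gp ∈ ms, d.contains gp.1 = true) →
      (cols.foldl (fun d col => aAssign col (PySem.Str.lower col) d ms) d).keys = d.keys := by
  intro cols
  induction cols with
  | nil => intro d _; rfl
  | cons c cs ih =>
    intro d hd
    have hstep : (aAssign c (PySem.Str.lower c) d ms).keys = d.keys := by
      rw [aAssign_char]
      cases hf : ms.find? (fun gp => bMatch c gp.2) with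
      | none => rfl
      | some gp =>
        have hm : gp ∈ ms := List.mem_of_find?_eq_some hf
        have hc : d.contains gp.1 = true := hd gp hm
        rw [PySem.Dict.keys_modify, PySem.Dict.keys_insert_of_contains _ _ hc]
    have hd' : ∀ gp ∈ ms, (aAssign c (PySem.Str.lower c) d ms).contains gp.1 = true := by
      intro gp hm
      rw [aAssign_char]
      cases hf : ms.find? (fun gq => bMatch c gq.2) with
      | none => exact hd gp hm
      | some gq => rw [PySem.Dict.contains_modify]; simp [hd gp hm]
    simp only [List.foldl_cons, ih _ hd', hstep]

theorem fkey_split (pre : List (String × List String)) (gp : String × List String)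
    (rest : List (String × List String)) (c : String)
    (hnd : ((pre ++ gp :: rest).map Prod.fst).Nodup) :
    fkey (pre ++ gp :: rest) gp.1 c =
      (bMatch c gp.2 && !((pre.map (fun q => q.2)).any (fun ps => bMatch c ps))) := by
  have hnd' := hnd
  simp only [List.map_append, List.map_cons, List.nodup_append, List.nodup_cons] at hnd'
  obtain ⟨-, ⟨hgrest, -⟩, hdisj⟩ := hnd'
  unfold fkey
  rw [List.find?_append]
  cases hp : pre.find? (fun gq => bMatch c gq.2) with
  | some gq =>
    have hmem : gq ∈ pre := List.mem_of_find?_eq_some hp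
    have hpred : bMatch c gq.2 = true := by simpa using List.find?_some hp
    have hne : gq.1 ≠ gp.1 := by
      intro h
      exact hdisj _ (List.mem_map_of_mem hmem) _ (by simp) h
    have hany : (pre.map (fun q => q.2)).any (fun ps => bMatch c ps) = true := by
      simp only [List.any_map, List.any_eq_true]
      exact ⟨gq, hmem, hpred⟩
    simp [Option.or, hany, hne]
  | none =>
    have hnone : ∀ q ∈ pre, ¬ (bMatch c q.2 = true) := List.find?_eq_none.mp hp
    have hany : (pre.map (fun q => q.2)).any (fun ps => bMatch c ps) = false := by
      simp only [List.any_map, List.any_eq_false]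
      intro q hq
      exact hnone q hq
    rw [hany]
    by_cases hb : bMatch c gp.2 = true
    · rw [List.find?_cons_of_pos (by simpa using hb)]
      simp [Option.or, hb]
    · rw [List.find?_cons_of_neg (by simpa using hb)]
      cases hr : rest.find? (fun gq => bMatch c gq.2) with
      | some gq =>
        have hmem : gq ∈ rest := List.mem_of_find?_eq_some hr
        have hne : gq.1 ≠ gp.1 := by
          intro h
          exact hgrest (h ▸ List.mem_map_of_mem hmem)
        simp [Option.or, hne, hb]
      | none => simp [Option.or, hb]

theorem bGo_core (mc : List String) :
    ∀ (ms pre : List (String × List String)),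
      ((pre ++ ms).map Prod.fst).Nodup →
      (ms.map (fun gp => (gp.1, mc.filter (fkey (pre ++ ms) gp.1)))).filter (fun gc => !gc.2.isEmpty) =
        bGo (mc.filter (fun c => !((pre.map (fun q => q.2)).any (fun ps => bMatch c ps)))) ms := by
  intro ms
  induction ms with
  | nil => intro pre _; rfl
  | cons gp rest ih =>
    intro pre hnd
    simp only [List.map_cons, List.filter_cons, bGo]
    have hhead : mc.filter (fkey (pre ++ gp :: rest) gp.1) =
        (mc.filter (fun c => !((pre.map (fun q => q.2)).any (fun ps => bMatch c ps)))).filter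
          (fun c => bMatch c gp.2) := by
      rw [List.filter_filter]
      refine List.filter_congr ?_
      intro c _
      rw [fkey_split pre gp rest c hnd, Bool.and_comm]
    have hrem : (mc.filter (fun c => !((pre.map (fun q => q.2)).any (fun ps => bMatch c ps)))).filter
          (fun c => !bMatch c gp.2) =
        mc.filter (fun c => !(((pre ++ [gp]).map (fun q => q.2)).any (fun ps => bMatch c ps))) := by
      rw [List.filter_filter]
      refine List.filter_congr ?_
      intro c _
      simp [Bool.and_comm]
    have htail := ih (pre ++ [gp]) (by rwa [List.append_assoc])
    rw [← List.append_cons] at htail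
    rw [hhead, htail, ← hrem]
    by_cases h : ((mc.filter (fun c => !((pre.map (fun q => q.2)).any (fun ps => bMatch c ps)))).filter
        (fun c => bMatch c gp.2)).isEmpty
    · rw [if_neg (by rw [h]; simp), if_pos h]
    · rw [if_pos (by rw [Bool.eq_false_iff.mpr h]; rfl), if_neg h]

theorem A_char (mc : List String) (ms : List (String × List String))
    (hnd : (ms.map Prod.fst).Nodup) :
    build_model_groups mc ms =
      (ms.map (fun gp => (gp.1, mc.filter (fkey ms gp.1)))).filter (fun gc => !gc.2.isEmpty) := by
  unfold build_model_groups
  have hfresh : ∀ gp ∈ ms, (PySem.Dict.empty : PySem.Dict String (List String)).contains gp.1 = false := by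
    intro gp _; simp [PySem.Dict.contains_empty]
  have hitems0 : (ms.foldl (fun d gp => d.insert gp.1 ([] : List String)) PySem.Dict.empty).items =
      ms.map (fun gp => (gp.1, ([] : List String))) := by
    have h := PySem.Dict.items_foldl_insert_fresh ms Prod.fst (fun _ => ([] : List String))
      PySem.Dict.empty hfresh hnd
    simpa using h
  set d0 := ms.foldl (fun d gp => d.insert gp.1 ([] : List String)) PySem.Dict.empty with hd0
  have hkeys0 : d0.keys = ms.map Prod.fst := by
    show d0.items.map Prod.fst = _
    rw [hitems0, List.map_map]
    rfl
  have hcont : ∀ gp ∈ ms, d0.contains gp.1 = true := by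
    intro gp hm
    rw [PySem.Dict.contains_iff_mem_keys, hkeys0]
    exact List.mem_map_of_mem hm
  set dF := mc.foldl (fun d col => aAssign col (PySem.Str.lower col) d ms) d0 with hdF
  have hkeysF : dF.keys = ms.map Prod.fst := by
    rw [hdF, foldl_keys ms mc d0 hcont, hkeys0]
  have hndF : dF.keys.Nodup := by rw [hkeysF]; exact hnd
  have hitemsF : dF.items = dF.keys.map (fun k => (k, dF.getD k [])) :=
    PySem.Dict.items_eq_map_keys dF hndF []
  have hgetD : ∀ gp ∈ ms, dF.getD gp.1 [] = mc.filter (fkey ms gp.1) := by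
    intro gp hm
    have h0 : d0.getD gp.1 [] = [] := by
      refine PySem.Dict.getD_of_mem_items d0 ?_ (by rw [hkeys0]; exact hnd) []
      rw [hitems0]
      exact List.mem_map_of_mem hm
    rw [hdF, foldl_getD ms mc d0 gp.1, h0, List.nil_append]
  show dF.items.filter (fun gc => !gc.2.isEmpty) = _
  rw [hitemsF, hkeysF, List.map_map]
  congr 1
  refine List.map_congr_left ?_
  intro gp hm
  simp only [Function.comp]
  rw [hgetD gp hm]

-- ===== VERDICT (by name: the statement is the Claim_ definition above) =====
theorem build_model_groups_spec : Claim_equal_build_model_groups := by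
  intro mc ms _ hnd
  unfold Spec_build_model_groups
  have h1 := A_char mc ms hnd
  have h2 := bGo_core mc ms [] (by simpa using hnd)
  simp only [List.nil_append, List.map_nil, List.any_nil, Bool.not_false, List.filter_true] at h2
  rw [h1, h2, build_model_groups_alt]
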